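-- pv_equiv track=rewrite | github.com/Matejop/Dictionary-app | dictionary_app.py | RefactorInput
-- ===== SOURCE A (Python) =====
-- def RefactorInput(input): #Returns refactored list of words from input in the same format as words in refactored wamerican
--     input = input.replace("\n\r", ' ')
--     input = input.replace('\n', ' ')
--
--     input_words = input.split()
--
--     for i in range(len(input_words)):
--         input_words[i] = list(input_words[i])
--         for j in range(len(input_words[i])):
--             if input_words[i][j].isalpha() or input_words[i][j] == '\'' or input_words[i][j] == ' ':
--                 continue
--             else:
--                 input_words[i][j] = ' '
--         input_words[i] = ''.join(input_words[i])
--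
--     input_words = ' '.join(input_words)
--     input_words = input_words.split()
--     return input_words
-- ===== SOURCE B (Python) =====
-- def RefactorInput(input):
--     result = []
--     current = []
--     for c in input:
--         if c.isalpha() or c == "'":
--             current.append(c)
--         else:
--             if current:
--                 result.append(''.join(current))
--                 current = []
--     if current:
--         result.append(''.join(current))
--     return result
-- ===== Notes on version B (the rewrite author's own statement) =====
-- stated objective: simpler
-- what changed: A's replace -> split -> per-word index loops -> join -> re-split pipeline is replaced by a single linear scan that accumulates letter/apostrophe runs and flushes them as words.
import Mathlib
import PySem

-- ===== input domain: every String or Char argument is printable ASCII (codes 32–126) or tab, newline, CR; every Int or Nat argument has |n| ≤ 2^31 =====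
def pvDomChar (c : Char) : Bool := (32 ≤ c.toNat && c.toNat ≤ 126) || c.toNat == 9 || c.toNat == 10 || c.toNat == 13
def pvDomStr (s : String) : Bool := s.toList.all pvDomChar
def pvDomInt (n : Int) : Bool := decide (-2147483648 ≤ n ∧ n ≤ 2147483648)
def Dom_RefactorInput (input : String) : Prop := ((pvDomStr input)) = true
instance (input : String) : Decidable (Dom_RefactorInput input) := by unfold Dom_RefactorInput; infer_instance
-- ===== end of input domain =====

-- B replaces A's replace→split→per-word index loops→join→re-split pipeline with one accumulator
-- scan over the characters (objective: simpler).

-- ===== PORT A =====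
-- literal transliteration of A: two replaces, split(), the two index loops (list mutation by
-- index = pySetD over pyRange), ''.join of the char list, ' '.join, final split().
def RefactorInput (input : String) : List String :=
  let input1 := PySem.Chars.replace input.toList ['\n', '\r'] [' ']
  let input2 := PySem.Chars.replace input1 ['\n'] [' ']
  let ws0 : List (List Char) := PySem.Chars.split₀ input2
  let ws1 : List (List Char) :=
    (PySem.List.pyRange 0 (PySem.List.len ws0) 1).foldl (fun ws i =>
      -- input_words[i] = list(input_words[i]) : already a char list here
      let w := PySem.List.pyGetD ws i []
      let w2 := (PySem.List.pyRange 0 (PySem.List.len w) 1).foldl (fun cs j =>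
        let c := PySem.List.pyGetD cs j ' '
        if PySem.Chars.isalpha c || c == '\'' || c == ' ' then cs
        else PySem.List.pySetD cs j ' ') w
      -- input_words[i] = ''.join(input_words[i])
      PySem.List.pySetD ws i (PySem.Chars.join [] (w2.map (fun c => [c])))) ws0
  let joined := PySem.Chars.join [' '] ws1
  (PySem.Chars.split₀ joined).map String.ofList

-- ===== PORT B =====
-- literal transliteration of Source B: one pass, state (result, current), flush on non-word chars.
def RefactorInput_alt (input : String) : List String :=
  let p := input.toList.foldl (fun (st : List String × List Char) c =>
      if PySem.Chars.isalpha c || c == '\'' then (st.1, st.2 ++ [c])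
      else if st.2.isEmpty then st else (st.1 ++ [String.ofList st.2], []))
    ([], [])
  if p.2.isEmpty then p.1 else p.1 ++ [String.ofList p.2]

-- ===== PRECONDITION & SPEC =====
def Spec_RefactorInput (input : String) (out : List String) : Prop := out = RefactorInput_alt input
instance (input : String) (out : List String) : Decidable (Spec_RefactorInput input out) := by unfold Spec_RefactorInput; infer_instance

-- ===== CLAIM (what is proved, stated in full; the proofs are below) =====
def Claim_equal_RefactorInput : Prop := ∀ (input : String), Dom_RefactorInput input → Spec_RefactorInput input (RefactorInput input)

-- ===== LEMMAS AND PROOFS =====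

-- word characters: letters and apostrophes
def pvKeep (c : Char) : Bool := PySem.Chars.isalpha c || c == '\''
-- A's per-character cleaning (non-word characters become a space)
def pvClean (c : Char) : Char := if pvKeep c then c else ' '

-- split₀ as a left fold: state = (current word reversed, finished words reversed)
def pvStepS (st : List Char × List (List Char)) (c : Char) : List Char × List (List Char) :=
  if PySem.Chars.isspace c then (if st.1.isEmpty then st else ([], st.1.reverse :: st.2))
  else (c :: st.1, st.2)
def pvFinS (st : List Char × List (List Char)) : List (List Char) :=
  if st.1.isEmpty then st.2.reverse else (st.1.reverse :: st.2).reverse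

-- B's scan on char lists: state = (finished words, current word), both in order
def pvStepK (st : List (List Char) × List Char) (c : Char) : List (List Char) × List Char :=
  if pvKeep c then (st.1, st.2 ++ [c])
  else if st.2.isEmpty then st else (st.1 ++ [st.2], [])
def pvFinK (st : List (List Char) × List Char) : List (List Char) :=
  if st.2.isEmpty then st.1 else st.1 ++ [st.2]
def pvScanK (cs : List Char) : List (List Char) := pvFinK (cs.foldl pvStepK ([], []))

theorem pv_keep_not_space (c : Char) (h : pvKeep c = true) : PySem.Chars.isspace c = false := by
  simp [pvKeep, PySem.Chars.isalpha, PySem.Chars.isupper, PySem.Chars.islower, Char.le_def,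
    UInt32.le_iff_toNat_le, Char.toNat_val] at h
  rcases h with (⟨h1,h2⟩|⟨h1,h2⟩)|h3
  · simp only [PySem.Chars.isspace]
    simp only [Bool.or_eq_false_iff, Bool.and_eq_false_iff, decide_eq_false_iff_not]
    omega
  · simp only [PySem.Chars.isspace]
    simp only [Bool.or_eq_false_iff, Bool.and_eq_false_iff, decide_eq_false_iff_not]
    omega
  · subst h3; decide

theorem pv_splitGo_eq (s : List Char) : ∀ cur acc,
    PySem.Chars.split₀.go s cur acc = pvFinS (s.foldl pvStepS (cur, acc)) := by
  induction s with
  | nil => intro cur acc; simp [PySem.Chars.split₀.go, pvFinS]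
  | cons c rest ih =>
    intro cur acc
    simp only [PySem.Chars.split₀.go, List.foldl_cons, pvStepS]
    by_cases h : PySem.Chars.isspace c
    · by_cases hc : cur.isEmpty
      · rw [List.isEmpty_iff] at hc; subst hc
        simp only [h, if_true, List.isEmpty_nil]
        exact ih [] acc
      · rw [Bool.not_eq_true] at hc
        simp only [h, hc, if_true, Bool.false_eq_true, if_false]
        exact ih [] _
    · simp only [h, if_false]
      exact ih _ acc


theorem pv_split₀_eq (s : List Char) :
    PySem.Chars.split₀ s = pvFinS (s.foldl pvStepS ([], [])) := pv_splitGo_eq s [] []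

theorem pv_accS (s : List Char) : ∀ cur acc,
    s.foldl pvStepS (cur, acc) = ((s.foldl pvStepS (cur, [])).1, (s.foldl pvStepS (cur, [])).2 ++ acc) := by
  induction s with
  | nil => simp
  | cons c rest ih =>
    intro cur acc
    simp only [List.foldl_cons, pvStepS]
    by_cases h : PySem.Chars.isspace c
    · by_cases hc : cur.isEmpty
      · simp only [h, hc, if_true]; exact ih cur acc
      · rw [Bool.not_eq_true] at hc
        simp only [h, hc, if_true, Bool.false_eq_true, if_false]
        rw [ih [] (cur.reverse :: acc), ih [] [cur.reverse]]
        simp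
    · simp only [h, if_false]; exact ih _ acc



theorem pv_accK (cs : List Char) : ∀ (A acc : List (List Char)) cur,
    cs.foldl pvStepK (A ++ acc, cur) = (A ++ (cs.foldl pvStepK (acc, cur)).1, (cs.foldl pvStepK (acc, cur)).2) := by
  induction cs with
  | nil => simp
  | cons c rest ih =>
    intro A acc cur
    simp only [List.foldl_cons, pvStepK]
    by_cases h : pvKeep c
    · simp only [h, if_true]; exact ih A acc _
    · simp only [h, Bool.false_eq_true, if_false]
      by_cases hc : cur.isEmpty
      · simp only [hc, if_true]; exact ih A acc cur
      · rw [Bool.not_eq_true] at hc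
        simp only [hc, Bool.false_eq_true, if_false]
        rw [List.append_assoc]
        exact ih A (acc ++ [cur]) []

theorem pv_genInv (cs : List Char) : ∀ curS accS,
    (cs.map pvClean).foldl pvStepS (curS, accS) =
      ((cs.foldl pvStepK (accS.reverse, curS.reverse)).2.reverse,
       (cs.foldl pvStepK (accS.reverse, curS.reverse)).1.reverse) := by
  induction cs with
  | nil => intro curS accS; simp
  | cons c rest ih =>
    intro curS accS
    simp only [List.map_cons, List.foldl_cons, pvStepS, pvStepK, pvClean]
    by_cases h : pvKeep c
    · simp only [h, if_true, pv_keep_not_space c h, Bool.false_eq_true, if_false]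
      have : (c :: curS).reverse = curS.reverse ++ [c] := by simp
      rw [← this] at *
      have := ih (c :: curS) accS
      simpa using this
    · simp only [h, Bool.false_eq_true, if_false]
      have hsp : PySem.Chars.isspace ' ' = true := by decide
      simp only [hsp, if_true]
      by_cases hc : curS.isEmpty
      · rw [List.isEmpty_iff] at hc; subst hc
        simpa using ih [] accS
      · rw [Bool.not_eq_true] at hc
        have hc' : curS.reverse.isEmpty = false := by
          simp [List.isEmpty_iff] at *; simpa using hc
        simp only [hc, hc', Bool.false_eq_true, if_false]
        have := ih [] (curS.reverse :: accS)
        simpa using this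

theorem pv_gen (cs : List Char) : PySem.Chars.split₀ (cs.map pvClean) = pvScanK cs := by
  show PySem.Chars.split₀.go (cs.map pvClean) [] [] = pvScanK cs
  rw [pv_splitGo_eq, pv_genInv]
  simp only [pvScanK, pvFinS, pvFinK, List.reverse_nil]
  by_cases h : (cs.foldl pvStepK ([], [])).2.isEmpty
  · have h2 : (cs.foldl pvStepK ([], [])).2.reverse.isEmpty = true := by
      simp [List.isEmpty_iff] at *; simp [h]
    simp [h, h2]
  · rw [Bool.not_eq_true] at h
    have h2 : (cs.foldl pvStepK ([], [])).2.reverse.isEmpty = false := by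
      simp [List.isEmpty_iff] at *; simpa using h
    simp [h, h2]

theorem pv_finK_acc (cs : List Char) (A : List (List Char)) (cur : List Char) :
    pvFinK (cs.foldl pvStepK (A, cur)) = A ++ pvFinK (cs.foldl pvStepK ([], cur)) := by
  have := pv_accK cs A [] cur
  rw [List.append_nil] at this
  rw [this]
  simp only [pvFinK]
  by_cases h : (cs.foldl pvStepK ([], cur)).2.isEmpty
  · simp [h]
  · rw [Bool.not_eq_true] at h; simp [h]

theorem pv_k2Inv (s : List Char) : ∀ curS accS,
    ((pvFinS (s.foldl pvStepS (curS, accS))).map pvScanK).flatten =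
      (accS.reverse.map pvScanK).flatten ++ pvFinK (s.foldl pvStepK (curS.reverse.foldl pvStepK ([], []))) := by
  induction s with
  | nil =>
    intro curS accS
    simp only [List.foldl_nil, pvFinS]
    by_cases h : curS.isEmpty
    · rw [List.isEmpty_iff] at h; subst h
      simp [pvFinK]
    · rw [Bool.not_eq_true] at h
      simp only [h, Bool.false_eq_true, if_false]
      simp [pvScanK]
  | cons c rest ih =>
    intro curS accS
    simp only [List.foldl_cons, pvStepS]
    by_cases h : PySem.Chars.isspace c
    · have hk : pvKeep c = false := by
        by_cases hkc : pvKeep c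
        · rw [pv_keep_not_space c hkc] at h; exact absurd h (by simp)
        · rwa [Bool.not_eq_true] at hkc
      by_cases hc : curS.isEmpty
      · rw [List.isEmpty_iff] at hc; subst hc
        simp only [List.isEmpty_nil, if_true, h]
        rw [ih [] accS]
        simp only [List.reverse_nil, List.foldl_nil, List.foldl_cons]
        have : pvStepK ([], []) c = ([], []) := by simp [pvStepK, hk]
        rw [this]
      · rw [Bool.not_eq_true] at hc
        simp only [h, if_true, hc, Bool.false_eq_true, if_false]
        rw [ih [] (curS.reverse :: accS)]
        simp only [List.reverse_cons, List.reverse_nil, List.foldl_nil, List.map_append,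
          List.flatten_append, List.map_cons, List.map_nil, List.flatten_cons, List.flatten_nil,
          List.append_nil, List.foldl_cons]
        rw [List.append_assoc]
        congr 1
        -- pvScanK curS.reverse ++ pvFinK (rest.foldl pvStepK ([],[])) = pvFinK (rest.foldl pvStepK (pvStepK st c))
        set st := curS.reverse.foldl pvStepK ([], []) with hst
        have hstep : pvStepK st c = (st.1 ++ (if st.2.isEmpty then [] else [st.2]), []) := by
          simp only [pvStepK, hk, Bool.false_eq_true, if_false]
          by_cases h2 : st.2.isEmpty
          · rw [List.isEmpty_iff] at h2
            simp only [h2, List.isEmpty_nil, if_true, List.append_nil]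
            exact Prod.ext rfl h2
          · rw [Bool.not_eq_true] at h2
            simp [h2]
        rw [hstep, pv_finK_acc]
        have : pvScanK curS.reverse = st.1 ++ (if st.2.isEmpty then [] else [st.2]) := by
          simp only [pvScanK, ← hst, pvFinK]
          by_cases h2 : st.2.isEmpty <;> simp [h2]
        rw [this, List.append_assoc]
        conv_rhs => rw [pv_finK_acc]
        simp
    · simp only [h, Bool.false_eq_true, if_false]
      rw [ih (c :: curS) accS]
      simp

theorem pv_k2 (s : List Char) : ((PySem.Chars.split₀ s).map pvScanK).flatten = pvScanK s := by
  show ((PySem.Chars.split₀.go s [] []).map pvScanK).flatten = pvScanK s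
  rw [pv_splitGo_eq, pv_k2Inv]
  simp [pvScanK]

theorem pv_catSp (x y : List Char) :
    PySem.Chars.split₀ (x ++ ' ' :: y) = PySem.Chars.split₀ x ++ PySem.Chars.split₀ y := by
  show PySem.Chars.split₀.go _ [] [] = PySem.Chars.split₀.go x [] [] ++ PySem.Chars.split₀.go y [] []
  rw [pv_splitGo_eq, pv_splitGo_eq, pv_splitGo_eq]
  rw [List.foldl_append, List.foldl_cons]
  set fx := x.foldl pvStepS ([], []) with hfx
  have hsp : PySem.Chars.isspace ' ' = true := by decide
  have hstep : pvStepS fx ' ' = ([], if fx.1.isEmpty then fx.2 else fx.1.reverse :: fx.2) := by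
    simp only [pvStepS, hsp, if_true]
    by_cases h : fx.1.isEmpty
    · rw [List.isEmpty_iff] at h
      simp only [h, List.isEmpty_nil, if_true]
      exact Prod.ext h rfl
    · rw [Bool.not_eq_true] at h; simp [h]
  rw [hstep, pv_accS y]
  simp only [pvFinS]
  by_cases hy : (y.foldl pvStepS ([], [])).1.isEmpty
  · simp only [hy, if_true, List.reverse_append]
    by_cases h : fx.1.isEmpty <;> simp [h]
  · rw [Bool.not_eq_true] at hy
    simp only [hy, Bool.false_eq_true, if_false, List.reverse_cons, List.reverse_append]
    by_cases h : fx.1.isEmpty <;> simp [h]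

theorem pv_join (ps : List (List Char)) :
    PySem.Chars.split₀ (PySem.Chars.join [' '] ps) = (ps.map PySem.Chars.split₀).flatten := by
  induction ps with
  | nil => decide
  | cons p rest ih =>
    cases rest with
    | nil => simp [PySem.Chars.join, List.intercalate]
    | cons q rest2 =>
      rw [PySem.Chars.join_cons_cons]
      have : p ++ [' '] ++ PySem.Chars.join [' '] (q :: rest2)
           = p ++ ' ' :: PySem.Chars.join [' '] (q :: rest2) := by simp
      rw [this, pv_catSp, ih]
      simp

theorem pv_allspace (ws : List Char) (hne : ws ≠ []) (hsp : ∀ c ∈ ws, PySem.Chars.isspace c = true) :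
    ∀ st : List Char × List (List Char),
      ws.foldl pvStepS st = ([], if st.1.isEmpty then st.2 else st.1.reverse :: st.2) := by
  induction ws with
  | nil => exact absurd rfl hne
  | cons c rest ih =>
    intro st
    have hc : PySem.Chars.isspace c = true := hsp c (by simp)
    rw [List.foldl_cons]
    have hstep : pvStepS st c = ([], if st.1.isEmpty then st.2 else st.1.reverse :: st.2) := by
      simp only [pvStepS, hc, if_true]
      by_cases h : st.1.isEmpty
      · rw [List.isEmpty_iff] at h
        simp only [h, List.isEmpty_nil, if_true]
        exact Prod.ext h rfl
      · rw [Bool.not_eq_true] at h; simp [h]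
    rw [hstep]
    cases rest with
    | nil => simp
    | cons d rest2 =>
      rw [ih (by simp) (fun e he => hsp e (by simp [he]))]
      simp

theorem pv_repAcc (old new : List Char) : ∀ (fuel : Nat) (l acc : List Char),
    PySem.Chars.replace.go old new fuel l acc = acc.reverse ++ PySem.Chars.replace.go old new fuel l [] := by
  intro fuel
  induction fuel with
  | zero => intro l acc; simp [PySem.Chars.replace.go]
  | succ f ih =>
    intro l acc
    cases l with
    | nil => simp [PySem.Chars.replace.go]
    | cons c t =>
      simp only [PySem.Chars.replace.go]
      by_cases h : old.isPrefixOf (c :: t)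
      · simp only [h, if_true]
        rw [ih _ (new.reverse ++ acc), ih _ (new.reverse ++ [])]
        simp
      · simp only [h, Bool.false_eq_true, if_false]
        rw [ih t (c :: acc), ih t [c]]
        simp

theorem pv_repMain (old new : List Char) (hone : old ≠ [])
    (hosp : ∀ c ∈ old, PySem.Chars.isspace c = true)
    (hnne : new ≠ []) (hnsp : ∀ c ∈ new, PySem.Chars.isspace c = true) :
    ∀ (fuel : Nat) (l : List Char), l.length ≤ fuel → ∀ st,
      (PySem.Chars.replace.go old new fuel l []).foldl pvStepS st = l.foldl pvStepS st := by
  intro fuel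
  induction fuel with
  | zero =>
    intro l hl st
    have : l = [] := by cases l <;> simp_all
    subst this
    simp [PySem.Chars.replace.go]
  | succ f ih =>
    intro l hl st
    cases l with
    | nil => simp [PySem.Chars.replace.go]
    | cons c t =>
      simp only [PySem.Chars.replace.go]
      by_cases h : old.isPrefixOf (c :: t)
      · simp only [h, if_true]
        rw [pv_repAcc, List.foldl_append]
        have hpre : old <+: (c :: t) := by rwa [← List.isPrefixOf_iff_prefix]
        have hdec : (c :: t) = old ++ (c :: t).drop old.length := (List.prefix_iff_eq_append.mp hpre).symm
        conv_rhs => rw [hdec]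
        rw [List.foldl_append]
        have hflush := pv_allspace new hnne hnsp st
        have hflush2 := pv_allspace old hone hosp st
        have hd : (new.reverse ++ []).reverse = new := by simp
        rw [hd, hflush, hflush2]
        exact ih _ (by
          have h1 : 1 ≤ old.length := by
            cases old
            · exact absurd rfl hone
            · simp
          simp only [List.length_drop, List.length_cons] at hl ⊢
          omega) _
      · simp only [h, Bool.false_eq_true, if_false]
        rw [pv_repAcc, List.foldl_append]
        simp only [List.reverse_cons, List.reverse_nil, List.nil_append, List.foldl_cons,
          List.foldl_nil]
        exact ih t (by simpa using Nat.le_of_succ_le_succ hl) (pvStepS st c)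

theorem pv_setD_append {α : Type} (pre : List α) (x v : α) (post : List α) :
    PySem.List.pySetD (pre ++ x :: post) (pre.length : Int) v = pre ++ v :: post := by
  simp only [PySem.List.pySetD, PySem.List.pySet?, PySem.List.pyIdx?]
  have h0 : (0 : Int) ≤ (pre.length : Int) := by positivity
  have h1 : (pre.length : Int) < ((pre ++ x :: post).length : Int) := by simp
  simp only [h0, if_true, List.length_append, List.length_cons, h1, if_pos h1, Int.toNat_natCast]
  simp

theorem pv_getD_append {α : Type} (pre : List α) (x : α) (post : List α) (d : α) :
    PySem.List.pyGetD (pre ++ x :: post) (pre.length : Int) d = x := by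
  rw [PySem.List.pyGetD_natCast]
  simp [List.getD]

theorem pv_maploop {α : Type} (g : α → α) (body : List α → Int → List α)
    (hbody : ∀ (pre : List α) (x : α) (post : List α), body (pre ++ x :: post) ((pre.length : Int)) = pre ++ g x :: post) :
    ∀ (l : List α), (PySem.List.pyRange 0 (PySem.List.len l) 1).foldl body l = l.map g := by
  intro l
  suffices h : ∀ n : Nat, n ≤ l.length → (PySem.List.pyRange 0 (n : Int) 1).foldl body l = (l.take n).map g ++ l.drop n by
    have := h l.length (le_refl _)
    simpa [PySem.List.len] using this
  intro n
  induction n with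
  | zero => intro _; simp [PySem.List.pyRange]
  | succ m ih =>
    intro hm
    have hcast : ((m + 1 : Nat) : Int) = (m : Int) + 1 := by push_cast; ring
    rw [hcast, PySem.List.pyRange_one_succ_right (by positivity), List.foldl_append]
    rw [ih (by omega)]
    simp only [List.foldl_cons, List.foldl_nil]
    have hlt : m < l.length := by omega
    have hdrop : l.drop m = l[m] :: l.drop (m + 1) := List.drop_eq_getElem_cons hlt
    rw [hdrop]
    have hlen : ((l.take m).map g).length = m := by simp [List.length_take, Nat.min_eq_left (le_of_lt hlt)]
    have := hbody ((l.take m).map g) l[m] (l.drop (m + 1))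
    rw [hlen] at this
    rw [this]
    have htake : (l.take (m + 1)).map g = (l.take m).map g ++ [g l[m]] := by
      rw [List.take_add_one, List.map_append]
      congr 1
      rw [List.getElem?_eq_getElem hlt]
      simp
    rw [htake]
    simp

theorem pv_repSplit (s old new : List Char) (hone : old ≠ [])
    (hosp : ∀ c ∈ old, PySem.Chars.isspace c = true)
    (hnne : new ≠ []) (hnsp : ∀ c ∈ new, PySem.Chars.isspace c = true) :
    PySem.Chars.split₀ (PySem.Chars.replace s old new) = PySem.Chars.split₀ s := by
  have hoe : old.isEmpty = false := by
    cases old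
    · exact absurd rfl hone
    · simp
  rw [pv_split₀_eq, pv_split₀_eq]
  simp only [PySem.Chars.replace, hoe, Bool.false_eq_true, if_false]
  rw [pv_repMain old new hone hosp hnne hnsp s.length s (le_refl _)]

-- B's fold is pvStepK with String.ofList applied to finished words
theorem pv_bBridge (cs : List Char) : ∀ (acc : List (List Char)) (cur : List Char),
    cs.foldl (fun (st : List String × List Char) c =>
        if PySem.Chars.isalpha c || c == '\'' then (st.1, st.2 ++ [c])
        else if st.2.isEmpty then st else (st.1 ++ [String.ofList st.2], []))
      (acc.map String.ofList, cur) =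
    ((cs.foldl pvStepK (acc, cur)).1.map String.ofList, (cs.foldl pvStepK (acc, cur)).2) := by
  induction cs with
  | nil => intro acc cur; simp
  | cons c rest ih =>
    intro acc cur
    simp only [List.foldl_cons, pvStepK, pvKeep]
    by_cases h : PySem.Chars.isalpha c || c == '\''
    · simp only [h, if_true]
      exact ih acc (cur ++ [c])
    · simp only [h, Bool.false_eq_true, if_false]
      by_cases hc : cur.isEmpty
      · simp only [hc, if_true]
        exact ih acc cur
      · rw [Bool.not_eq_true] at hc
        simp only [hc, Bool.false_eq_true, if_false]
        have := ih (acc ++ [cur]) []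
        simpa using this

-- A's per-character condition is pvClean
theorem pv_cleanA (c : Char) :
    (if PySem.Chars.isalpha c || c == '\'' || c == ' ' then c else ' ') = pvClean c := by
  simp only [pvClean, pvKeep]
  by_cases h : PySem.Chars.isalpha c || c == '\''
  · simp [h]
  · simp only [h, Bool.false_or, Bool.false_eq_true, if_false]
    by_cases hs : c == ' '
    · have : c = ' ' := by simpa using hs
      simp [this]
    · simp [hs]

-- ===== VERDICT (by name: the statement is the Claim_ definition above) =====
theorem RefactorInput_spec : Claim_equal_RefactorInput := by
  intro input _
  unfold Spec_RefactorInput RefactorInput RefactorInput_alt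
  dsimp only []
  -- B side
  have hB := pv_bBridge input.toList [] []
  simp only [List.map_nil] at hB
  rw [hB]
  -- A side: the two index loops are maps
  have hinner : ∀ w : List Char,
      (PySem.List.pyRange 0 (PySem.List.len w) 1).foldl (fun cs j =>
        let c := PySem.List.pyGetD cs j ' '
        if PySem.Chars.isalpha c || c == '\'' || c == ' ' then cs
        else PySem.List.pySetD cs j ' ') w = w.map pvClean := by
    intro w
    refine pv_maploop pvClean _ ?_ w
    intro pre x post
    simp only [pv_getD_append]
    by_cases h : PySem.Chars.isalpha x || x == '\'' || x == ' '
    · simp only [h, if_true]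
      rw [← pv_cleanA x]
      simp [h]
    · simp only [h, Bool.false_eq_true, if_false, pv_setD_append]
      rw [← pv_cleanA x]
      simp [h]
  have houter : ∀ ws0 : List (List Char),
      (PySem.List.pyRange 0 (PySem.List.len ws0) 1).foldl (fun ws i =>
        let w := PySem.List.pyGetD ws i []
        let w2 := (PySem.List.pyRange 0 (PySem.List.len w) 1).foldl (fun cs j =>
          let c := PySem.List.pyGetD cs j ' '
          if PySem.Chars.isalpha c || c == '\'' || c == ' ' then cs
          else PySem.List.pySetD cs j ' ') w
        PySem.List.pySetD ws i (PySem.Chars.join [] (w2.map (fun c => [c])))) ws0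
      = ws0.map (fun w => w.map pvClean) := by
    intro ws0
    refine pv_maploop (fun w => w.map pvClean) _ ?_ ws0
    intro pre x post
    simp only [pv_getD_append, hinner x, PySem.Chars.join_nil_singletons, pv_setD_append]
  rw [houter]
  -- the two replaces do not change split₀
  have hrep2 : PySem.Chars.split₀
      (PySem.Chars.replace (PySem.Chars.replace input.toList ['\n', '\r'] [' ']) ['\n'] [' '])
      = PySem.Chars.split₀ input.toList := by
    have hsp : ∀ (l : List Char), (∀ c ∈ l, c = '\n' ∨ c = '\r' ∨ c = ' ') →
        ∀ c ∈ l, PySem.Chars.isspace c = true := by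
      intro l hl c hc
      rcases hl c hc with h | h | h <;> (subst h; decide)
    rw [pv_repSplit _ _ _ (by simp) (hsp _ (by intro c hc; simp at hc; tauto))
          (by simp) (hsp _ (by intro c hc; simp at hc; tauto)),
        pv_repSplit _ _ _ (by simp) (hsp _ (by intro c hc; simp at hc; tauto))
          (by simp) (hsp _ (by intro c hc; simp at hc; tauto))]
  rw [hrep2]
  -- join/split collapses to the flattened per-word scan
  rw [pv_join]
  have hmm : ((PySem.Chars.split₀ input.toList).map (fun w => w.map pvClean)).map PySem.Chars.split₀
      = (PySem.Chars.split₀ input.toList).map pvScanK := by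
    rw [List.map_map]
    apply List.map_congr_left
    intro w _
    exact pv_gen w
  rw [hmm, pv_k2]
  -- both sides are the same scan
  simp only [pvScanK, pvFinK]
  by_cases h : (input.toList.foldl pvStepK ([], [])).2.isEmpty
  · simp [h]
  · rw [Bool.not_eq_true] at h
    simp [h]
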